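-- pv_equiv track=rewrite | github.com/S-Christensen/cartographersStudy | scoringCards.py | goldenGranary
-- ===== SOURCE A (Python) =====
-- def goldenGranary(grid):
--     points = 0
--     ruins = [(1,5), (2,1), (2,8), (8,1), (8,9), (9,5)]
--
--     for r in range(len(grid)):
--         for c in range(len(grid[0])):
--             if grid[r][c] == "water":
--                 for dr, dc in [(1,0), (-1,0), (0,1), (0,-1)]:
--                     nr, nc = r + dr, c + dc
--                     if 0 <= nr < len(grid) and 0 <= nc < len(grid[0]) and (nr, nc) in ruins:
--                         points += 1
--                         break
--             elif grid[r][c] == "farm" and (r, c) in ruins: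
--                 points += 3
--     return points
-- ===== SOURCE B (Python) =====
-- def goldenGranary(grid):
--     ruins = [(1, 5), (2, 1), (2, 8), (8, 1), (8, 9), (9, 5)]
--     nrows = len(grid)
--     ncols = len(grid[0]) if grid else 0
--     farms = 0
--     water = set()
--     for r, c in ruins:
--         if r < nrows and c < ncols:
--             if grid[r][c] == "farm":
--                 farms += 1
--             for nr, nc in ((r + 1, c), (r - 1, c), (r, c + 1), (r, c - 1)):
--                 if 0 <= nr < nrows and 0 <= nc < ncols and grid[nr][nc] == "water":
--                     water.add((nr, nc))
--     return 3 * farms + len(water)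
-- ===== Notes on version B (the rewrite author's own statement) =====
-- stated objective: faster
-- what changed: A scans every grid cell and tests its neighbours against the ruin list; B iterates only over the 6 fixed ruin coordinates, counting farms on in-bounds ruins and collecting in-bounds water neighbours in a set, returning 3*farms + len(water_set).
import Mathlib
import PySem

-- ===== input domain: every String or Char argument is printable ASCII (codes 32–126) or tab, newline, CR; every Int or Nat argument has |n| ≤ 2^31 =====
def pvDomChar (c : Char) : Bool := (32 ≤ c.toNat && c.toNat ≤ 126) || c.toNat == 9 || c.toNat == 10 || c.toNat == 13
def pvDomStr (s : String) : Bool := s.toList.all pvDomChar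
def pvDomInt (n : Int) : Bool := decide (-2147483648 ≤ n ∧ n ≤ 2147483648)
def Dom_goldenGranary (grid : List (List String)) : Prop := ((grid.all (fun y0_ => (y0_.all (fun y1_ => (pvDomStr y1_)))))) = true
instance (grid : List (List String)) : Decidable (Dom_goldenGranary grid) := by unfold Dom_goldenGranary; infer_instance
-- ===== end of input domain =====

-- B iterates only over the 6 fixed ruin coordinates (farm counter + set of water neighbours)
-- instead of scanning every grid cell: asymptotically faster; return value only, no mutation.


-- ===== PORT A =====
-- ruins = [(1,5), (2,1), (2,8), (8,1), (8,9), (9,5)]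
def pvRuins : List (Int × Int) := [(1,5), (2,1), (2,8), (8,1), (8,9), (9,5)]
-- the neighbour offsets [(1,0), (-1,0), (0,1), (0,-1)]
def pvDeltas : List (Int × Int) := [(1,0), (-1,0), (0,1), (0,-1)]
-- grid[r][c]; exact for 0 ≤ r, c in bounds — all use sites are guarded (by the loop ranges
-- under Pre_, or by explicit bound checks)
def pvCell (grid : List (List String)) (r c : Int) : String :=
  (grid.getD r.toNat []).getD c.toNat ""
-- 0 <= r < len(grid) and 0 <= c < len(grid[0])
def pvInb (grid : List (List String)) (r c : Int) : Bool :=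
  decide (0 ≤ r) && decide (r < (grid.length : Int)) &&
  decide (0 ≤ c) && decide (c < ((grid.headD []).length : Int))
-- the inner 'for dr, dc in …: … break' loop of A
abbrev pvWaterBreak (grid : List (List String)) (r c : Int)
    (ds : List (Int × Int)) (points : Int) : Int :=
  match ds with
  | [] => points
  | d :: rest =>
    if pvInb grid (r + d.1) (c + d.2) && decide ((r + d.1, c + d.2) ∈ pvRuins) then points + 1
    else pvWaterBreak grid r c rest points

def goldenGranary (grid : List (List String)) : Int :=
  (List.range grid.length).foldl (fun (pts : Int) (r : Nat) =>
    (List.range (grid.headD []).length).foldl (fun (pts : Int) (c : Nat) =>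
      if pvCell grid (r : Int) (c : Int) = "water" then pvWaterBreak grid (r : Int) (c : Int) pvDeltas pts
      else if pvCell grid (r : Int) (c : Int) = "farm" && decide (((r : Int), (c : Int)) ∈ pvRuins) then pts + 3
      else pts) pts) 0

-- ===== PORT B =====
def goldenGranary_alt (grid : List (List String)) : Int :=
  let nrows : Int := grid.length
  let ncols : Int := (grid.headD []).length   -- len(grid[0]) if grid else 0
  let st := pvRuins.foldl (fun (st : Int × PySem.Set (Int × Int)) rc =>
      if decide (rc.1 < nrows) && decide (rc.2 < ncols) then
        (if pvCell grid rc.1 rc.2 = "farm" then st.1 + 1 else st.1,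
         [(rc.1 + 1, rc.2), (rc.1 - 1, rc.2), (rc.1, rc.2 + 1), (rc.1, rc.2 - 1)].foldl
           (fun ws p =>
             if pvInb grid p.1 p.2 && decide (pvCell grid p.1 p.2 = "water")
             then PySem.Set.add ws p else ws) st.2)
      else st) (0, PySem.Set.ofList [])
  3 * st.1 + (st.2.length : Int)

-- ===== PRECONDITION & SPEC =====
-- Pre_ excludes exactly the ragged grids on which A raises IndexError: a row shorter than
-- row 0 is indexed with a column < len(grid[0]) by A's loop.
def Pre_goldenGranary (grid : List (List String)) : Prop :=
  ∀ row ∈ grid, (grid.headD []).length ≤ row.length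
instance (grid : List (List String)) : Decidable (Pre_goldenGranary grid) := by
  unfold Pre_goldenGranary; infer_instance
def pvWitness_goldenGranary : List (List String) :=
  [["x", "x", "x", "x", "x", "water"], ["x", "x", "x", "x", "x", "farm"]]
def Spec_goldenGranary (grid : List (List String)) (out : Int) : Prop := out = goldenGranary_alt grid
instance (grid : List (List String)) (out : Int) : Decidable (Spec_goldenGranary grid out) := by unfold Spec_goldenGranary; infer_instance

-- ===== CLAIM (what is proved, stated in full; the proofs are below) =====
def Claim_equal_goldenGranary : Prop := ∀ (grid : List (List String)), Dom_goldenGranary grid → Pre_goldenGranary grid → Spec_goldenGranary grid (goldenGranary grid)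

-- ===== LEMMAS AND PROOFS =====

-- ---- proof-only definitions ----
-- sum of f over the rectangle [0,n) × [0,m)
def pvSum2 (n m : Nat) (f : Nat → Nat → Int) : Int :=
  ((List.range n).map (fun r => ((List.range m).map (f r)).sum)).sum
-- (ruin, neighbour-of-that-ruin) pairs, in B's traversal order
def pvT : List ((Int × Int) × (Int × Int)) :=
  pvRuins.flatMap (fun ρ => pvDeltas.map (fun d => (ρ, (ρ.1 + d.1, ρ.2 + d.2))))
abbrev pvInbP (grid : List (List String)) (q : Int × Int) : Prop := pvInb grid q.1 q.2 = true
abbrev pvWat (grid : List (List String)) (q : Int × Int) : Prop := pvCell grid q.1 q.2 = "water"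
abbrev pvFarm (grid : List (List String)) (q : Int × Int) : Prop := pvCell grid q.1 q.2 = "farm"
-- the common target value
def pvTarget (grid : List (List String)) : Int :=
  (pvRuins.map (fun ρ => if pvInbP grid ρ ∧ pvFarm grid ρ then (3:Int) else 0)).sum +
  (pvT.map (fun x => if pvInbP grid x.1 ∧ pvInbP grid x.2 ∧ pvWat grid x.2 then (1:Int) else 0)).sum

-- per-cell contribution of A's loop body
def pvG (grid : List (List String)) (r c : Nat) : Int :=
  (if pvWat grid ((r : Int), (c : Int)) ∧
      (∃ d ∈ pvDeltas, pvInbP grid ((r : Int) + d.1, (c : Int) + d.2) ∧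
        ((r : Int) + d.1, (c : Int) + d.2) ∈ pvRuins) then 1 else 0) +
  (if pvFarm grid ((r : Int), (c : Int)) ∧ ((r : Int), (c : Int)) ∈ pvRuins then 3 else 0)

theorem pvInb_iff (grid : List (List String)) (r c : Int) :
    pvInb grid r c = true ↔
      0 ≤ r ∧ r < (grid.length : Int) ∧ 0 ≤ c ∧ c < ((grid.headD []).length : Int) := by
  simp [pvInb, and_assoc]

theorem waterBreak_eq (grid : List (List String)) (r c : Int) (ds : List (Int × Int)) (pts : Int) :
    pvWaterBreak grid r c ds pts =
      pts + (if ∃ d ∈ ds, pvInbP grid (r + d.1, c + d.2) ∧ (r + d.1, c + d.2) ∈ pvRuins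
             then 1 else 0) := by
  induction ds with
  | nil => simp [pvWaterBreak]
  | cons d rest ih =>
    simp only [pvWaterBreak]
    by_cases h : pvInbP grid (r + d.1, c + d.2) ∧ (r + d.1, c + d.2) ∈ pvRuins
    · have hb : (pvInb grid (r + d.1) (c + d.2) && decide ((r + d.1, c + d.2) ∈ pvRuins)) = true := by
        simp only [pvInbP] at h; simp [h.1, h.2]
      rw [if_pos hb, if_pos ⟨d, List.mem_cons_self, h⟩]
    · have hb : ¬ ((pvInb grid (r + d.1) (c + d.2) && decide ((r + d.1, c + d.2) ∈ pvRuins)) = true) := by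
        simp only [pvInbP] at h; simpa [-Bool.and_eq_true] using h
      rw [if_neg hb, ih]
      congr 1
      apply if_congr _ rfl rfl
      constructor
      · rintro ⟨d', hd', hp⟩; exact ⟨d', List.mem_cons_of_mem _ hd', hp⟩
      · rintro ⟨d', hd', hp⟩
        rcases List.mem_cons.mp hd' with rfl | hd'
        · exact absurd hp h
        · exact ⟨d', hd', hp⟩

theorem A_eq_sum2 (grid : List (List String)) :
    goldenGranary grid = pvSum2 grid.length (grid.headD []).length (pvG grid) := by
  unfold goldenGranary pvSum2
  have hstep : ∀ (r : Nat) (pts : Int) (c : Nat),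
      (if pvCell grid (r : Int) (c : Int) = "water" then pvWaterBreak grid (r : Int) (c : Int) pvDeltas pts
       else if pvCell grid (r : Int) (c : Int) = "farm" && decide (((r : Int), (c : Int)) ∈ pvRuins) then pts + 3
       else pts) = pts + pvG grid r c := by
    intro r pts c
    by_cases hw : pvCell grid (r : Int) (c : Int) = "water"
    · rw [if_pos hw, waterBreak_eq]
      have hf : ¬ (pvFarm grid ((r : Int), (c : Int)) ∧ ((r : Int), (c : Int)) ∈ pvRuins) := by
        rintro ⟨hf, -⟩; rw [pvFarm] at hf; simp [hw] at hf
      simp only [pvG, pvWat, hw, true_and, if_neg hf, add_zero]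
    · rw [if_neg (by simpa using hw)]
      simp only [pvG, pvWat, hw, false_and, if_false, zero_add]
      by_cases hf : pvCell grid (r : Int) (c : Int) = "farm" ∧ ((r : Int), (c : Int)) ∈ pvRuins
      · have hb : (pvCell grid (r : Int) (c : Int) = "farm" && decide (((r : Int), (c : Int)) ∈ pvRuins)) = true := by
          simp [hf.1, hf.2]
        rw [if_pos hb, if_pos (by simpa [pvFarm] using hf)]
      · have hb : ¬ ((pvCell grid (r : Int) (c : Int) = "farm" && decide (((r : Int), (c : Int)) ∈ pvRuins)) = true) := by
          simpa [-Bool.and_eq_true] using hf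
        rw [if_neg hb, if_neg (by simpa [pvFarm] using hf), add_zero]
  have hin : (fun (pts : Int) (r : Nat) =>
      (List.range (grid.headD []).length).foldl (fun (pts : Int) (c : Nat) =>
        if pvCell grid (r : Int) (c : Int) = "water" then pvWaterBreak grid (r : Int) (c : Int) pvDeltas pts
        else if pvCell grid (r : Int) (c : Int) = "farm" && decide (((r : Int), (c : Int)) ∈ pvRuins) then pts + 3
        else pts) pts) =
      fun (pts : Int) (r : Nat) => pts + ((List.range (grid.headD []).length).map (pvG grid r)).sum := by
    funext pts r
    have h2 : (fun (pts : Int) (c : Nat) =>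
        if pvCell grid (r : Int) (c : Int) = "water" then pvWaterBreak grid (r : Int) (c : Int) pvDeltas pts
        else if pvCell grid (r : Int) (c : Int) = "farm" && decide (((r : Int), (c : Int)) ∈ pvRuins) then pts + 3
        else pts) = fun (pts : Int) (c : Nat) => pts + pvG grid r c := by
      funext pts c; exact hstep r pts c
    rw [h2, PySem.List.foldl_add]
  rw [hin, PySem.List.foldl_add]
  simp

theorem sum_range_delta (n : Nat) (a : Int) (ha : 0 ≤ a) (X : Prop) [Decidable X] (k : Int) :
    ((List.range n).map (fun (r : Nat) => if (r : Int) = a ∧ X then k else 0)).sum =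
      if a < (n : Int) ∧ X then k else 0 := by
  induction n with
  | zero =>
    simp only [List.range_zero, List.map_nil, List.sum_nil]
    rw [if_neg (fun h => by have := h.1; omega)]
  | succ n ih =>
    rw [List.range_succ, List.map_append, List.sum_append, ih]
    simp only [List.map_cons, List.map_nil, List.sum_cons, List.sum_nil, add_zero]
    by_cases hX : X
    · simp only [eq_true hX, and_true]
      by_cases h1 : a < (n : Int)
      · rw [if_pos h1, if_neg (by omega), if_pos (by omega)]; ring
      · by_cases h2 : (n : Int) = a
        · rw [if_neg h1, if_pos h2, if_pos (by omega)]; ring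
        · rw [if_neg h1, if_neg h2, if_neg (by omega)]; ring
    · simp only [eq_false hX, and_false, if_false]; ring

theorem sum2_delta (n m : Nat) (q : Int × Int) (h1 : 0 ≤ q.1) (h2 : 0 ≤ q.2)
    (X : Prop) [Decidable X] (k : Int) :
    pvSum2 n m (fun r c => if ((r : Int), (c : Int)) = q ∧ X then k else 0) =
      if q.1 < (n : Int) ∧ q.2 < (m : Int) ∧ X then k else 0 := by
  unfold pvSum2
  have hin : ∀ r : Nat,
      ((List.range m).map (fun (c : Nat) => if ((r : Int), (c : Int)) = q ∧ X then k else 0)).sum =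
        if (r : Int) = q.1 ∧ (q.2 < (m : Int) ∧ X) then k else 0 := by
    intro r
    have : (fun (c : Nat) => if ((r : Int), (c : Int)) = q ∧ X then k else 0) =
        fun (c : Nat) => if (c : Int) = q.2 ∧ ((r : Int) = q.1 ∧ X) then k else 0 := by
      funext c
      apply if_congr _ rfl rfl
      rw [Prod.ext_iff]; tauto
    rw [this, sum_range_delta m q.2 h2]
    apply if_congr _ rfl rfl
    tauto
  rw [List.map_congr_left (fun r _ => hin r), sum_range_delta n q.1 h1]

theorem sum2_add (n m : Nat) (f g : Nat → Nat → Int) :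
    pvSum2 n m (fun r c => f r c + g r c) = pvSum2 n m f + pvSum2 n m g := by
  unfold pvSum2
  rw [← PySem.List.sum_map_add_int]
  congr 1
  apply List.map_congr_left
  intro r _
  exact PySem.List.sum_map_add_int (List.range m) (f r) (g r)

theorem sum2_zero (n m : Nat) : pvSum2 n m (fun _ _ => 0) = 0 := by
  simp [pvSum2]

theorem sum2_listsum {β : Type} (n m : Nat) (L : List β) (F : β → Nat → Nat → Int) :
    pvSum2 n m (fun r c => (L.map (fun x => F x r c)).sum) =
      (L.map (fun x => pvSum2 n m (F x))).sum := by
  induction L with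
  | nil => simpa using sum2_zero n m
  | cons b L ih =>
    simp only [List.map_cons, List.sum_cons]
    rw [← ih, ← sum2_add]

theorem ite_exists_eq_sum {β : Type} (L : List β) (f : β → Int × Int)
    (hnd : (L.map f).Nodup) (p : Int × Int) (X : β → Prop) [DecidablePred X] (k : Int) :
    (if ∃ x ∈ L, p = f x ∧ X x then k else 0) =
      (L.map (fun x => if p = f x ∧ X x then k else 0)).sum := by
  induction L with
  | nil => simp
  | cons b L ih =>
    simp only [List.map_cons, List.sum_cons] at *
    have hnd' := (List.nodup_cons.mp hnd).2
    have hfb : f b ∉ L.map f := (List.nodup_cons.mp hnd).1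
    by_cases h : p = f b ∧ X b
    · rw [if_pos ⟨b, List.mem_cons_self, h⟩, if_pos h]
      have hz : (L.map (fun x => if p = f x ∧ X x then k else 0)).sum = 0 := by
        apply List.sum_eq_zero
        intro y hy
        rcases List.mem_map.mp hy with ⟨x, hx, rfl⟩
        rw [if_neg]
        rintro ⟨hpx, -⟩
        apply hfb
        have he : f b = f x := h.1.symm.trans hpx
        rw [he]
        exact List.mem_map_of_mem hx
      rw [hz]; ring
    · rw [if_neg h, ← ih hnd', zero_add]
      apply if_congr _ rfl rfl
      constructor
      · rintro ⟨x, hx, hp⟩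
        rcases List.mem_cons.mp hx with rfl | hx
        · exact absurd hp h
        · exact ⟨x, hx, hp⟩
      · rintro ⟨x, hx, hp⟩; exact ⟨x, List.mem_cons_of_mem _ hx, hp⟩

-- the water condition of A's per-cell test, re-indexed by (ruin, neighbour) pairs
theorem condW (grid : List (List String)) (p : Int × Int) :
    (pvWat grid p ∧ ∃ d ∈ pvDeltas, pvInbP grid (p.1 + d.1, p.2 + d.2) ∧
        (p.1 + d.1, p.2 + d.2) ∈ pvRuins) ↔
      ∃ x ∈ pvT, p = x.2 ∧ (pvInbP grid x.1 ∧ pvWat grid x.2) := by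
  have hneg : ∀ d ∈ pvDeltas, ((-d.1, -d.2) : Int × Int) ∈ pvDeltas := by decide
  constructor
  · rintro ⟨hw, d, hd, hinb, hmem⟩
    refine ⟨((p.1 + d.1, p.2 + d.2), p), ?_, rfl, hinb, hw⟩
    unfold pvT
    rw [List.mem_flatMap]
    refine ⟨(p.1 + d.1, p.2 + d.2), hmem, ?_⟩
    rw [List.mem_map]
    refine ⟨(-d.1, -d.2), hneg d hd, ?_⟩
    obtain ⟨p1, p2⟩ := p
    simp only [Prod.mk.injEq]
    norm_num
  · rintro ⟨x, hx, rfl, hinb, hw⟩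
    refine ⟨hw, ?_⟩
    unfold pvT at hx
    rw [List.mem_flatMap] at hx
    rcases hx with ⟨ρ, hρ, hx⟩
    rw [List.mem_map] at hx
    rcases hx with ⟨d, hd, rfl⟩
    refine ⟨(-d.1, -d.2), hneg d hd, ?_⟩
    simp only []
    have e1 : (ρ.1 + d.1 + -d.1 : Int) = ρ.1 := by ring
    have e2 : (ρ.2 + d.2 + -d.2 : Int) = ρ.2 := by ring
    rw [e1, e2]
    exact ⟨hinb, hρ⟩

theorem condF (grid : List (List String)) (p : Int × Int) :
    (pvFarm grid p ∧ p ∈ pvRuins) ↔ ∃ ρ ∈ pvRuins, p = ρ ∧ pvFarm grid ρ := by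
  constructor
  · rintro ⟨hf, hm⟩; exact ⟨p, hm, rfl, hf⟩
  · rintro ⟨ρ, hm, rfl, hf⟩; exact ⟨hf, hm⟩

theorem pvT_nodup : (pvT.map Prod.snd).Nodup := by decide
theorem pvRuins_nodup : (pvRuins.map (fun ρ : Int × Int => ρ)).Nodup := by decide
theorem pvT_bounds : ∀ x ∈ pvT, 0 ≤ x.1.1 ∧ 0 ≤ x.1.2 ∧ 0 ≤ x.2.1 ∧ 0 ≤ x.2.2 := by decide
theorem pvRuins_bounds : ∀ ρ ∈ pvRuins, 0 ≤ ρ.1 ∧ 0 ≤ ρ.2 := by decide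

theorem A_eq_target (grid : List (List String)) : goldenGranary grid = pvTarget grid := by
  rw [A_eq_sum2]
  have hG : pvG grid = fun (r : Nat) (c : Nat) =>
      (pvT.map (fun x => if ((r : Int), (c : Int)) = x.2 ∧ (pvInbP grid x.1 ∧ pvWat grid x.2)
        then (1:Int) else 0)).sum +
      (pvRuins.map (fun ρ => if ((r : Int), (c : Int)) = ρ ∧ pvFarm grid ρ then (3:Int) else 0)).sum := by
    funext r c
    unfold pvG
    congr 1
    · rw [← ite_exists_eq_sum pvT Prod.snd pvT_nodup]
      exact if_congr (condW grid ((r : Int), (c : Int))) rfl rfl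
    · rw [← ite_exists_eq_sum pvRuins (fun ρ => ρ) pvRuins_nodup]
      exact if_congr (condF grid ((r : Int), (c : Int))) rfl rfl
  rw [hG, sum2_add, sum2_listsum, sum2_listsum]
  unfold pvTarget
  rw [add_comm]
  congr 1
  · congr 1
    apply List.map_congr_left
    intro ρ hρ
    rw [sum2_delta _ _ ρ (pvRuins_bounds ρ hρ).1 (pvRuins_bounds ρ hρ).2]
    apply if_congr _ rfl rfl
    simp only [pvInbP, pvInb_iff]
    have := pvRuins_bounds ρ hρ
    constructor
    · rintro ⟨h1, h2, h3⟩; exact ⟨⟨this.1, h1, this.2, h2⟩, h3⟩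
    · rintro ⟨⟨-, h1, -, h2⟩, h3⟩; exact ⟨h1, h2, h3⟩
  · congr 1
    apply List.map_congr_left
    intro x hx
    rw [sum2_delta _ _ x.2 (pvT_bounds x hx).2.2.1 (pvT_bounds x hx).2.2.2]
    apply if_congr _ rfl rfl
    simp only [pvInbP, pvInb_iff]
    have := pvT_bounds x hx
    constructor
    · rintro ⟨h1, h2, h3, h4⟩; exact ⟨h3, ⟨this.2.2.1, h1, this.2.2.2, h2⟩, h4⟩
    · rintro ⟨h3, ⟨-, h1, -, h2⟩, h4⟩; exact ⟨h1, h2, h3, h4⟩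


-- B-side abbreviations
abbrev pvGuardB (grid : List (List String)) (ρ : Int × Int) : Bool :=
  decide (ρ.1 < (grid.length : Int)) && decide (ρ.2 < ((grid.headD []).length : Int))
abbrev pvCondB (grid : List (List String)) (q : Int × Int) : Bool :=
  pvInb grid q.1 q.2 && decide (pvCell grid q.1 q.2 = "water")

theorem foldl_if_prod {α β γ : Type} (L : List α) (g : α → Bool) (F : β → α → β)
    (G : γ → α → γ) (a : β) (s : γ) :
    L.foldl (fun st x => if g x then (F st.1 x, G st.2 x) else st) (a, s) =
      (L.foldl (fun b x => if g x then F b x else b) a,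
       L.foldl (fun c x => if g x then G c x else c) s) := by
  have h : (fun (st : β × γ) x => if g x then (F st.1 x, G st.2 x) else st) =
      fun (st : β × γ) x => ((if g x then F st.1 x else st.1), (if g x then G st.2 x else st.2)) := by
    funext st x; by_cases h : g x <;> simp [h]
  rw [h, PySem.List.foldl_prod_mk (f := fun b x => if g x then F b x else b)
        (g := fun c x => if g x then G c x else c)]

-- the guarded inner fold with the guard pushed into the per-element condition
theorem guard_fold_push (l : List (Int × Int)) (g : Bool) (C : Int × Int → Bool)
    (s : PySem.Set (Int × Int)) :
    (if g then l.foldl (fun s p => if C p then PySem.Set.add s p else s) s else s) =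
      l.foldl (fun s p => if g && C p then PySem.Set.add s p else s) s := by
  by_cases hg : g
  · simp only [hg, if_pos, Bool.true_and]
  · simp only [Bool.not_eq_true] at hg
    simp only [hg, Bool.false_and, Bool.false_eq_true, if_false]
    induction l generalizing s with
    | nil => rfl
    | cons p l ih => simpa using ih _

theorem addfold_len (T : List ((Int × Int) × (Int × Int))) (C : (Int × Int) × (Int × Int) → Bool)
    (s : PySem.Set (Int × Int)) (hnd : (T.map Prod.snd).Nodup) (hs : ∀ x ∈ T, x.2 ∉ s) :
    ((T.foldl (fun s x => if C x then PySem.Set.add s x.2 else s) s).length : Int) =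
      (s.length : Int) + (T.map (fun x => if C x then (1:Int) else 0)).sum := by
  induction T generalizing s with
  | nil => simp
  | cons x T ih =>
    simp only [List.map_cons, List.nodup_cons, List.mem_map] at hnd
    simp only [List.foldl_cons, List.map_cons, List.sum_cons]
    by_cases hC : C x
    · rw [if_pos hC, if_pos hC]
      have hadd : PySem.Set.add s x.2 = s ++ [x.2] :=
        PySem.Set.add_of_not_mem (hs x List.mem_cons_self)
      have hrec := ih (PySem.Set.add s x.2) hnd.2 ?_
      · rw [hrec, hadd]
        simp only [List.length_append, List.length_cons, List.length_nil]
        push_cast; ring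
      · intro y hy
        rw [hadd]
        simp only [List.mem_append, List.mem_singleton]
        rintro (h | h)
        · exact hs y (List.mem_cons_of_mem _ hy) h
        · exact hnd.1 ⟨y, hy, h⟩
    · rw [if_neg hC, if_neg hC, ih s hnd.2 (fun y hy => hs y (List.mem_cons_of_mem _ hy)), zero_add]

theorem pvT_flat : pvT = pvRuins.flatMap (fun ρ =>
    [(ρ.1 + 1, ρ.2), (ρ.1 - 1, ρ.2), (ρ.1, ρ.2 + 1), (ρ.1, ρ.2 - 1)].map (fun q => (ρ, q))) := by
  decide

theorem B_eq_target (grid : List (List String)) : goldenGranary_alt grid = pvTarget grid := by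
  unfold goldenGranary_alt
  dsimp only
  rw [foldl_if_prod pvRuins (pvGuardB grid)
      (F := fun b rc => if pvCell grid rc.1 rc.2 = "farm" then b + 1 else b)
      (G := fun c rc => [(rc.1 + 1, rc.2), (rc.1 - 1, rc.2), (rc.1, rc.2 + 1), (rc.1, rc.2 - 1)].foldl
        (fun ws p => if pvCondB grid p then PySem.Set.add ws p else ws) c)]
  -- farm accumulator as a sum over the ruins
  have hfarm : pvRuins.foldl (fun b rc =>
        if pvGuardB grid rc then (if pvCell grid rc.1 rc.2 = "farm" then b + 1 else b) else b) (0 : Int)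
      = (pvRuins.map (fun ρ => if pvGuardB grid ρ = true ∧ pvFarm grid ρ then (1:Int) else 0)).sum := by
    have h : (fun (b : Int) (rc : Int × Int) =>
        if pvGuardB grid rc then (if pvCell grid rc.1 rc.2 = "farm" then b + 1 else b) else b)
        = fun (b : Int) rc => b + (if pvGuardB grid rc = true ∧ pvFarm grid rc then 1 else 0) := by
      funext b rc
      by_cases h1 : pvGuardB grid rc <;> by_cases h2 : pvCell grid rc.1 rc.2 = "farm" <;>
        simp [h1, h2, pvFarm]
    rw [h, PySem.List.foldl_add]
    simp
  -- water set as a fold over the flattened (ruin, neighbour) list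
  have hset : pvRuins.foldl (fun c rc =>
        if pvGuardB grid rc then
          [(rc.1 + 1, rc.2), (rc.1 - 1, rc.2), (rc.1, rc.2 + 1), (rc.1, rc.2 - 1)].foldl
            (fun ws p => if pvCondB grid p then PySem.Set.add ws p else ws) c
        else c) (PySem.Set.ofList [])
      = pvT.foldl (fun s x =>
          if pvGuardB grid x.1 && pvCondB grid x.2 then PySem.Set.add s x.2 else s)
          (PySem.Set.ofList []) := by
    have h1 : (fun (c : PySem.Set (Int × Int)) (rc : Int × Int) =>
        if pvGuardB grid rc then
          [(rc.1 + 1, rc.2), (rc.1 - 1, rc.2), (rc.1, rc.2 + 1), (rc.1, rc.2 - 1)].foldl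
            (fun ws p => if pvCondB grid p then PySem.Set.add ws p else ws) c
        else c)
        = fun c rc =>
          [(rc.1 + 1, rc.2), (rc.1 - 1, rc.2), (rc.1, rc.2 + 1), (rc.1, rc.2 - 1)].foldl
            (fun ws p => if pvGuardB grid rc && pvCondB grid p then PySem.Set.add ws p else ws) c := by
      funext c rc
      exact guard_fold_push _ _ _ _
    rw [h1, pvT_flat, List.foldl_flatMap]
    simp only [List.foldl_map]
  rw [hfarm, hset]
  rw [addfold_len pvT _ (PySem.Set.ofList []) pvT_nodup (by intro x hx h; simp [PySem.Set.ofList] at h)]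
  unfold pvTarget
  congr 1
  · -- farm part
    rw [← PySem.List.sum_map_const_mul_int]
    congr 1
    apply List.map_congr_left
    intro ρ hρ
    have hb := pvRuins_bounds ρ hρ
    have hiff : (pvInbP grid ρ ∧ pvFarm grid ρ) ↔ (pvGuardB grid ρ = true ∧ pvFarm grid ρ) := by
      simp only [pvInbP, pvInb_iff, pvGuardB, Bool.and_eq_true, decide_eq_true_iff]
      constructor
      · rintro ⟨⟨-, h1, -, h2⟩, h3⟩; exact ⟨⟨h1, h2⟩, h3⟩
      · rintro ⟨⟨h1, h2⟩, h3⟩; exact ⟨⟨hb.1, h1, hb.2, h2⟩, h3⟩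
    rw [if_congr hiff rfl rfl]
    split_ifs <;> ring
  · -- water part
    rw [show ((PySem.Set.ofList [] : PySem.Set (Int × Int)).length : Int) = 0 from rfl, zero_add]
    congr 1
    apply List.map_congr_left
    intro x hx
    have hb := pvT_bounds x hx
    apply if_congr _ rfl rfl
    have hb1 := hb.1
    have hb2 := hb.2.1
    simp only [pvInbP, pvWat, pvInb_iff, pvGuardB, pvCondB, Bool.and_eq_true, decide_eq_true_iff]
    tauto

-- ===== VERDICT (by name: the statement is the Claim_ definition above) =====
theorem goldenGranary_spec : Claim_equal_goldenGranary := by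
  intro grid _ _
  unfold Spec_goldenGranary
  rw [A_eq_target, B_eq_target]
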